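-- pv_equiv track=rewrite | github.com/sodown4thecause/orchestrator-agentic | node_modules/agentic-workflow-builder-backend/services/intent-parser/src/main.py | determine_output_format
-- ===== SOURCE A (Python) =====
-- def determine_output_format(command: str) -> str:
--     """Determine expected output format"""
--     command_lower = command.lower()
--
--     if any(word in command_lower for word in ["presentation", "slides", "ppt"]):
--         return "Presentation"
--     elif any(word in command_lower for word in ["report", "document", "pdf"]):
--         return "Report"
--     elif any(word in command_lower for word in ["dashboard", "chart", "graph"]):
--         return "Dashboard"
--     elif any(word in command_lower for word in ["email", "notification", "alert"]):
--         return "Notification"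
--     elif any(word in command_lower for word in ["file", "backup", "export"]):
--         return "File"
--     else:
--         return "Data Output"
-- ===== SOURCE B (Python) =====
-- _LABELS = ("Presentation", "Report", "Dashboard", "Notification", "File")
--
-- # each keyword mapped to the priority rank of its label
-- _KEYWORD_RANK = {
--     "presentation": 0, "slides": 0, "ppt": 0,
--     "report": 1, "document": 1, "pdf": 1,
--     "dashboard": 2, "chart": 2, "graph": 2,
--     "email": 3, "notification": 3, "alert": 3,
--     "file": 4, "backup": 4, "export": 4,
-- }
--
-- def determine_output_format(command: str) -> str:
--     """Determine expected output format"""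
--     command_lower = command.lower()
--     ranks = [rank for kw, rank in _KEYWORD_RANK.items() if kw in command_lower]
--     return _LABELS[min(ranks)] if ranks else "Data Output"
-- ===== Notes on version B (the rewrite author's own statement) =====
-- stated objective: alternative
-- what changed: Instead of A's prioritized if/elif chain that stops at the first matching keyword group, B builds a flat keyword-to-priority-rank map, collects the ranks of ALL keywords found in the lowered command, and returns the label of the minimum rank (or 'Data Output' if none matched).
import Mathlib
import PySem

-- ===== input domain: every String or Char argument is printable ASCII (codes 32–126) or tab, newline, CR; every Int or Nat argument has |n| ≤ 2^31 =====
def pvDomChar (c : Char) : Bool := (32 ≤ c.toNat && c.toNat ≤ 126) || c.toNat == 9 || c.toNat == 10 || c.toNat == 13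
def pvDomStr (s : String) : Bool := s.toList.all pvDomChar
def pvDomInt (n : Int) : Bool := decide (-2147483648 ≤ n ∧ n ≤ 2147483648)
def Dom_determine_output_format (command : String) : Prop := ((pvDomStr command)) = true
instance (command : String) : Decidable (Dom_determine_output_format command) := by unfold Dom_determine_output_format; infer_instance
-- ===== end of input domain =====

-- B drops A's prioritized first-match if/elif chain: it collects the ranks of ALL matching
-- keywords from a flat keyword→rank map and returns the label of the minimum rank (alternative decomposition, same cost).

-- ===== PORT A =====
def determine_output_format (command : String) : String :=
  let command_lower := PySem.Str.lower command
  if (["presentation", "slides", "ppt"].any fun word => PySem.Str.isIn word command_lower) then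
    "Presentation"
  else if (["report", "document", "pdf"].any fun word => PySem.Str.isIn word command_lower) then
    "Report"
  else if (["dashboard", "chart", "graph"].any fun word => PySem.Str.isIn word command_lower) then
    "Dashboard"
  else if (["email", "notification", "alert"].any fun word => PySem.Str.isIn word command_lower) then
    "Notification"
  else if (["file", "backup", "export"].any fun word => PySem.Str.isIn word command_lower) then
    "File"
  else
    "Data Output"

-- ===== PORT B =====
def pvLabels : List String := ["Presentation", "Report", "Dashboard", "Notification", "File"]

-- the _KEYWORD_RANK dict as an association list in insertion order
def pvKeywordRank : List (String × Int) :=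
  [ ("presentation", 0), ("slides", 0), ("ppt", 0),
    ("report", 1), ("document", 1), ("pdf", 1),
    ("dashboard", 2), ("chart", 2), ("graph", 2),
    ("email", 3), ("notification", 3), ("alert", 3),
    ("file", 4), ("backup", 4), ("export", 4) ]

def determine_output_format_alt (command : String) : String :=
  let command_lower := PySem.Str.lower command
  let ranks : List Int :=
    (pvKeywordRank.filter (fun p => PySem.Str.isIn p.1 command_lower)).map Prod.snd
  match PySem.List.min? ranks (fun r => r) with
  | some r => (PySem.List.pyGet? pvLabels r).getD ""   -- min rank is always 0..4, so in range
  | none => "Data Output"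

-- ===== PRECONDITION & SPEC =====
def Spec_determine_output_format (command : String) (out : String) : Prop := out = determine_output_format_alt command
instance (command : String) (out : String) : Decidable (Spec_determine_output_format command out) := by unfold Spec_determine_output_format; infer_instance

-- ===== CLAIM (what is proved, stated in full; the proofs are below) =====
def Claim_equal_determine_output_format : Prop := ∀ (command : String), Dom_determine_output_format command → Spec_determine_output_format command (determine_output_format command)

-- ===== LEMMAS AND PROOFS =====

-- abstract form of A's if/elif chain over the five group tests
def pvChainF (g1 g2 g3 g4 g5 : Bool) : String :=
  if g1 then "Presentation"
  else if g2 then "Report"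
  else if g3 then "Dashboard"
  else if g4 then "Notification"
  else if g5 then "File"
  else "Data Output"

-- filter of a fixed list by a parallel list of booleans (the shape B's List.filter takes here)
def pvFilt : List Bool → List (String × Int) → List (String × Int)
  | t :: bs, p :: ps => match t with
    | true => p :: pvFilt bs ps
    | false => pvFilt bs ps
  | _, _ => []

-- abstract form of B's min-rank dispatch over the fifteen keyword tests
def pvMinF (bs : List Bool) : String :=
  match PySem.List.min? (List.map Prod.snd (pvFilt bs pvKeywordRank)) (fun r => r) with
  | some r => (PySem.List.pyGet? pvLabels r).getD ""
  | none => "Data Output"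

-- the whole equivalence, abstracted to the fifteen boolean test results
set_option maxHeartbeats 2000000 in
theorem pvKey : ∀ (b1 b2 b3 b4 b5 b6 b7 b8 b9 b10 b11 b12 b13 b14 b15 : Bool),
    pvChainF (b1 || (b2 || (b3 || false))) (b4 || (b5 || (b6 || false)))
      (b7 || (b8 || (b9 || false))) (b10 || (b11 || (b12 || false)))
      (b13 || (b14 || (b15 || false)))
      = pvMinF [b1, b2, b3, b4, b5, b6, b7, b8, b9, b10, b11, b12, b13, b14, b15] := by
  decide

-- ===== VERDICT =====
set_option maxHeartbeats 2000000 in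
theorem determine_output_format_spec : Claim_equal_determine_output_format := by
  intro command _
  exact pvKey (PySem.Str.isIn "presentation" (PySem.Str.lower command)) (PySem.Str.isIn "slides" (PySem.Str.lower command)) (PySem.Str.isIn "ppt" (PySem.Str.lower command)) (PySem.Str.isIn "report" (PySem.Str.lower command)) (PySem.Str.isIn "document" (PySem.Str.lower command)) (PySem.Str.isIn "pdf" (PySem.Str.lower command)) (PySem.Str.isIn "dashboard" (PySem.Str.lower command)) (PySem.Str.isIn "chart" (PySem.Str.lower command)) (PySem.Str.isIn "graph" (PySem.Str.lower command)) (PySem.Str.isIn "email" (PySem.Str.lower command)) (PySem.Str.isIn "notification" (PySem.Str.lower command)) (PySem.Str.isIn "alert" (PySem.Str.lower command)) (PySem.Str.isIn "file" (PySem.Str.lower command)) (PySem.Str.isIn "backup" (PySem.Str.lower command)) (PySem.Str.isIn "export" (PySem.Str.lower command))
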